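-- pv_equiv track=rewrite | github.com/Alturino/problem-solving | python/interview-questions/test_traveloka_mobile.py | easyPattern
-- ===== SOURCE A (Python) =====
-- def easyPattern(n: int) -> str:
--     rows = cols = (n * 2) - 1
--     grid = [[" "] * rows for i in range(rows)]
--     visited = set()
--
--     def topDiag(row: int, col: int, ch: str):
--         if row not in range(n) or col not in range(cols) or (row, col) in visited:
--             return
--         visited.add((row, col))
--         grid[row][col] = ch
--         topDiag(row + 1, col + 1, ch)
--
--     def botDiag(row: int, col: int, ch: str):
--         if row not in range(rows) or col not in range(n) or (row, col) in visited:
--             return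
--         visited.add((row, col))
--         grid[row][col] = ch
--         botDiag(row + 1, col + 1, ch)
--
--     ## top
--     for row in range(n):
--         for col in range(n):
--             if (row, col) in visited:
--                 continue
--
--             if row == 0 and col == n - 1:
--                 prev = "x"
--                 for temp_row in range(row, n, 2):
--                     topDiag(temp_row, col, prev)
--                     if prev == "x":
--                         prev = "o"
--                     elif prev == "o":
--                         prev = "x"
--             if col == 0 and row == n - 1:
--                 prev = "x"
--                 for temp_col in range(col, n, 2):
--                     botDiag(row, temp_col, prev)
--                     if prev == "x":
--                         prev = "o"
--                     elif prev == "o":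
--                         prev = "x"
--
--     res = ["".join(grid[i]) for i in range(rows)]
--     return "\n".join(res)
-- ===== SOURCE B (Python) =====
-- def easyPattern(n: int) -> str:
--     size = 2 * n - 1
--
--     def cell(r, c):
--         # '\' diagonal through the top half: started at (k, n-1) for even k
--         k = n - 1 + r - c
--         ch = " "
--         if r < n and 0 <= k <= r and k % 2 == 0:
--             ch = "x" if k % 4 == 0 else "o"
--         if ch == " ":
--             # '\' diagonal through the bottom half: started at (n-1, c0) for even c0
--             c0 = c - r + n - 1
--             if n - 1 <= r and c < n and 0 <= c0 and c0 % 2 == 0: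
--                 ch = "x" if c0 % 4 == 0 else "o"
--         return ch
--
--     return "\n".join("".join(cell(r, c) for c in range(size)) for r in range(size))
-- ===== Notes on version B (the rewrite author's own statement) =====
-- stated objective: simpler
-- what changed: Replaces the mutable grid, the visited set and the two recursive diagonal painters with a closed-form per-cell colour test (diagonal index and its parity) joined directly into the output string.
import Mathlib
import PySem

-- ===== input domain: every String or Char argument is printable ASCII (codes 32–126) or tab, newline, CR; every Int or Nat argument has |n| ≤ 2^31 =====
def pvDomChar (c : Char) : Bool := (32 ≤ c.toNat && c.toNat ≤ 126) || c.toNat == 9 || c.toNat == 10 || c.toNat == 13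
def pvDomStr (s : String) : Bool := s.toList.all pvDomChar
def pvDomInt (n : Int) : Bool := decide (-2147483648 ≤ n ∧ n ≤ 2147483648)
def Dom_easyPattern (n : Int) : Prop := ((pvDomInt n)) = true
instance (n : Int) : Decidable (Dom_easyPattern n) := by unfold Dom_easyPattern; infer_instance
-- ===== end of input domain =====

-- B replaces A's mutable grid, visited set and recursive diagonal painters by a closed-form
-- per-cell colour test (objective: simpler; only the RETURN value is claimed equal).

-- ===== PORT A =====
-- grid cells are the one-character strings " "/"x"/"o": modelled as Char; "".join(grid[i])
-- over one-char cells is the row itself, and "\n".join is PySem.Chars.join ['\n'].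
-- grid[row][col] = ch :
def pvSetCell (g : List (List Char)) (row col : Int) (ch : Char) : List (List Char) :=
  PySem.List.pySetD g row (PySem.List.pySetD (PySem.List.pyGetD g row []) col ch)

-- prev = "o" if prev == "x" else ("x" if prev == "o" else prev)  (the toggle in both loops)
def pvToggle (prev : Char) : Char := if prev = 'x' then 'o' else if prev = 'o' then 'x' else prev

-- topDiag and botDiag are the SAME code up to the two bounds: topDiag = pvDiagA n cols,
-- botDiag = pvDiagA rows n ('if row not in range(rb) or col not in range(cb) or visited').
-- the recursion descends on the measure (rb - row).toNat, passed as a structural fuel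
-- argument by the wrapper below (the guard stops the walk before the fuel can run out)
def pvDiagAGo (rb cb : Int) (ch : Char) : Nat → Int → Int →
    List (List Char) × PySem.Set (Int × Int) → List (List Char) × PySem.Set (Int × Int)
  | 0, _, _, s => s
  | fuel + 1, row, col, s =>
    if ¬(0 ≤ row ∧ row < rb) ∨ ¬(0 ≤ col ∧ col < cb) ∨ (row, col) ∈ s.2 then s
    else pvDiagAGo rb cb ch fuel (row + 1) (col + 1)
      (pvSetCell s.1 row col ch, PySem.Set.add s.2 (row, col))

def pvDiagA (rb cb : Int) (ch : Char) (row col : Int)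
    (s : List (List Char) × PySem.Set (Int × Int)) :
    List (List Char) × PySem.Set (Int × Int) :=
  pvDiagAGo rb cb ch (rb - row).toNat row col s

-- the body of the double 'for row/col in range(n)' loop
def pvBodyA (n rows cols : Int) (s : List (List Char) × PySem.Set (Int × Int))
    (rc : Int × Int) : List (List Char) × PySem.Set (Int × Int) :=
  if rc ∈ s.2 then s
  else
    let s1 := if rc.1 = 0 ∧ rc.2 = n - 1 then
        ((PySem.List.pyRange rc.1 n 2).foldl
          (fun sp temp_row => (pvDiagA n cols sp.2 temp_row rc.2 sp.1, pvToggle sp.2))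
          (s, 'x')).1
      else s
    if rc.2 = 0 ∧ rc.1 = n - 1 then
        ((PySem.List.pyRange rc.2 n 2).foldl
          (fun sp temp_col => (pvDiagA rows n sp.2 rc.1 temp_col sp.1, pvToggle sp.2))
          (s1, 'x')).1
      else s1

def easyPattern (n : Int) : String :=
  let rows := n * 2 - 1
  let cols := rows
  let grid : List (List Char) :=
    (PySem.List.pyRange 0 rows 1).map (fun _ => PySem.List.pyRepeat [' '] rows)
  let sF := (PySem.List.pyRange 0 n 1).foldl (fun s row =>
      (PySem.List.pyRange 0 n 1).foldl (fun s col => pvBodyA n rows cols s (row, col)) s)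
    (grid, PySem.Set.empty)
  let res := (PySem.List.pyRange 0 rows 1).map (fun i => PySem.List.pyGetD sF.1 i [])
  String.mk (PySem.Chars.join ['\n'] res)

-- ===== PORT B =====
def pvCellB (n r c : Int) : Char :=
  let k := n - 1 + r - c
  let ch := if r < n ∧ 0 ≤ k ∧ k ≤ r ∧ k % 2 = 0 then (if k % 4 = 0 then 'x' else 'o') else ' '
  if ch = ' ' then
    let c0 := c - r + n - 1
    if n - 1 ≤ r ∧ c < n ∧ 0 ≤ c0 ∧ c0 % 2 = 0 then (if c0 % 4 = 0 then 'x' else 'o') else ch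
  else ch

def easyPattern_alt (n : Int) : String :=
  let size := 2 * n - 1
  String.mk (PySem.Chars.join ['\n'] ((PySem.List.pyRange 0 size 1).map (fun r =>
    (PySem.List.pyRange 0 size 1).map (fun c => pvCellB n r c))))

-- ===== PRECONDITION & SPEC =====
def Spec_easyPattern (n : Int) (out : String) : Prop := out = easyPattern_alt n
instance (n : Int) (out : String) : Decidable (Spec_easyPattern n out) := by
  unfold Spec_easyPattern; infer_instance

-- ===== CLAIM (what is proved, stated in full; the proofs are below) =====
def Claim_equal_easyPattern : Prop :=
  ∀ (n : Int), Dom_easyPattern n → Spec_easyPattern n (easyPattern n)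

-- ===== LEMMAS AND PROOFS =====

-- proof-side abbreviations
def pvR (n : Int) : Nat := (2 * n - 1).toNat
def pvShape (n : Int) (g : List (List Char)) : Prop :=
  g.length = pvR n ∧ ∀ i < pvR n, (g.getD i []).length = pvR n
def pvGetC (g : List (List Char)) (i j : Nat) : Char := (g.getD i []).getD j ' '
-- the cells painted by one diagonal walk started at (row, col) with bounds (rb, cb)
def pvDiagReg (rb cb row col I J : Int) : Bool :=
  decide (row ≤ I ∧ I < rb ∧ J = col + (I - row) ∧ J < cb)
-- the cells painted by the top fills from diagonal start k0 on (diagonal index n-1+I-J)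
def pvTopReg (n k0 I J : Int) : Bool :=
  decide (k0 ≤ n - 1 + I - J ∧ (n - 1 + I - J - k0) % 2 = 0 ∧ n - 1 + I - J ≤ I ∧ I < n)
-- the cells painted by the bottom fills from diagonal start c0 on (index J-I+n-1)
def pvBotReg (n c0 I J : Int) : Bool :=
  decide (c0 ≤ J - I + n - 1 ∧ (J - I + n - 1 - c0) % 2 = 0 ∧ J - I + n - 1 < n - 1 ∧
    n - 1 ≤ I ∧ I < 2 * n - 1 ∧ J < n)

lemma pvDiagReg_iff {rb cb row col I J : Int} :
    pvDiagReg rb cb row col I J = true ↔ row ≤ I ∧ I < rb ∧ J = col + (I - row) ∧ J < cb := by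
  simp [pvDiagReg]

lemma pvTopReg_iff {n k0 I J : Int} :
    pvTopReg n k0 I J = true ↔
      k0 ≤ n - 1 + I - J ∧ (n - 1 + I - J - k0) % 2 = 0 ∧ n - 1 + I - J ≤ I ∧ I < n := by
  simp [pvTopReg]

lemma pvBotReg_iff {n c0 I J : Int} :
    pvBotReg n c0 I J = true ↔
      c0 ≤ J - I + n - 1 ∧ (J - I + n - 1 - c0) % 2 = 0 ∧ J - I + n - 1 < n - 1 ∧
      n - 1 ≤ I ∧ I < 2 * n - 1 ∧ J < n := by
  simp [pvBotReg]

lemma pvToggle_toggle {prev : Char} (h : prev = 'x' ∨ prev = 'o') :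
    pvToggle (pvToggle prev) = prev := by
  rcases h with h | h <;> subst h <;> decide

lemma pvToggle_mem {prev : Char} (h : prev = 'x' ∨ prev = 'o') :
    pvToggle prev = 'x' ∨ pvToggle prev = 'o' := by
  rcases h with h | h <;> subst h <;> decide

lemma pvRange_two_nil {a b : Int} (h : b ≤ a) : PySem.List.pyRange a b 2 = [] := by
  rw [PySem.List.pyRange_of_pos _ _ (by norm_num)]
  rw [if_neg (by omega)]
  simp

lemma pvRange_two_cons {a b : Int} (h : a < b) :
    PySem.List.pyRange a b 2 = a :: PySem.List.pyRange (a + 2) b 2 := by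
  rw [PySem.List.pyRange_of_pos _ _ (by norm_num),
      PySem.List.pyRange_of_pos _ _ (by norm_num)]
  have hc : ((b - a + 2 - 1) / 2).toNat
      = (if a + 2 < b then ((b - (a + 2) + 2 - 1) / 2).toNat else 0) + 1 := by
    split <;> omega
  rw [if_pos h, hc, List.range_succ_eq_map, List.map_cons, List.map_map]
  congr 1
  · norm_num
  · apply List.map_congr_left
    intro x _
    simp [Function.comp]
    push_cast
    ring

lemma pvSetCell_length (g : List (List Char)) (row col : Int) (ch : Char) :
    (pvSetCell g row col ch).length = g.length := by
  simp [pvSetCell, PySem.List.length_pySetD]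

lemma pvSetCell_rowlen (g : List (List Char)) {row : Int} (col : Int) (ch : Char)
    (hr : 0 ≤ row) (i : Nat) :
    ((pvSetCell g row col ch).getD i []).length = (g.getD i []).length := by
  unfold pvSetCell
  rw [PySem.List.pySetD_of_nonneg _ _ hr, PySem.List.pyGetD_of_nonneg _ _ hr]
  simp only [List.getD_eq_getElem?_getD, List.getElem?_set]
  split_ifs with h1 h2
  · subst h1
    simp [List.getElem?_eq_getElem h2, PySem.List.length_pySetD]
  · subst h1
    simp [List.getElem?_eq_none (by omega : g.length ≤ row.toNat)]
  · rfl

lemma pvGetC_setCell (g : List (List Char)) {row col : Int} (ch : Char)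
    (hr : 0 ≤ row) (hrl : row.toNat < g.length) (hc : 0 ≤ col)
    (hcl : col.toNat < (g.getD row.toNat []).length) (i j : Nat) :
    pvGetC (pvSetCell g row col ch) i j =
      if i = row.toNat ∧ j = col.toNat then ch else pvGetC g i j := by
  unfold pvSetCell pvGetC
  rw [PySem.List.pySetD_of_nonneg _ _ hr, PySem.List.pyGetD_of_nonneg _ _ hr,
    PySem.List.pySetD_of_nonneg _ _ hc]
  simp only [List.getD_eq_getElem?_getD, List.getElem?_set] at hcl ⊢
  by_cases h1 : row.toNat = i
  · subst h1
    simp only [if_pos hrl, reduceIte, Option.getD_some]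
    by_cases h2 : col.toNat = j
    · subst h2
      simp [hcl]
    · rw [if_neg (fun h => h2 h.2.symm)]
      simp [List.getElem?_set, h2]
  · simp only [if_neg h1]
    rw [if_neg (fun hh => h1 hh.1.symm)]

lemma pvDiagAGo_spec (n rb cb : Int) (ch : Char) (hrb : rb ≤ 2 * n - 1) (hcb : cb ≤ 2 * n - 1) :
    ∀ (fuel : Nat) (row col : Int) (g : List (List Char)) (v : PySem.Set (Int × Int)),
    (rb - row).toNat = fuel → 0 ≤ row → 0 ≤ col →
    (∀ t : Int, 0 ≤ t → row + t < rb → col + t < cb → (row + t, col + t) ∉ v) →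
    pvShape n g →
    pvShape n (pvDiagAGo rb cb ch fuel row col (g, v)).1 ∧
    (∀ p : Int × Int, p ∈ (pvDiagAGo rb cb ch fuel row col (g, v)).2 ↔
      p ∈ v ∨ pvDiagReg rb cb row col p.1 p.2) ∧
    (∀ i j : Nat, i < pvR n → j < pvR n →
      pvGetC (pvDiagAGo rb cb ch fuel row col (g, v)).1 i j =
        if pvDiagReg rb cb row col (i : Int) (j : Int) then ch else pvGetC g i j) := by
  intro fuel
  induction fuel with
  | zero =>
    intro row col g v hm hr hc hv hsh
    simp only [pvDiagAGo]
    refine ⟨hsh, ?_, ?_⟩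
    · intro p
      constructor
      · exact fun h => Or.inl h
      · rintro (h | h)
        · exact h
        · rw [pvDiagReg_iff] at h; omega
    · intro i j _ _
      rw [if_neg (by rw [pvDiagReg_iff]; omega)]
  | succ m ih =>
    intro row col g v hm hr hc hv hsh
    by_cases hg : ¬(0 ≤ row ∧ row < rb) ∨ ¬(0 ≤ col ∧ col < cb) ∨ (row, col) ∈ v
    · simp only [pvDiagAGo]
      rw [if_pos hg]
      have hreg : ∀ I J : Int, ¬ pvDiagReg rb cb row col I J = true := by
        by_cases hb : (0 ≤ row ∧ row < rb) ∧ (0 ≤ col ∧ col < cb)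
        · have hvv : (row, col) ∈ v := by
            rcases hg with h | h | h
            · exact absurd hb.1 h
            · exact absurd hb.2 h
            · exact h
          have := hv 0 le_rfl (by omega) (by omega)
          simp at this
          exact absurd hvv this
        · push_neg at hb
          intro I J hR
          rw [pvDiagReg_iff] at hR
          rcases (by omega : rb ≤ row ∨ cb ≤ col) with h | h <;> omega
      refine ⟨hsh, ?_, ?_⟩
      · intro p
        constructor
        · exact fun h => Or.inl h
        · rintro (h | h)
          · exact h
          · exact absurd h (hreg p.1 p.2)
      · intro i j _ _
        rw [if_neg (hreg _ _)]
    · push_neg at hg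
      obtain ⟨⟨hr0, hrlt⟩, ⟨hc0, hclt⟩, hnv⟩ := hg
      simp only [pvDiagAGo]
      rw [if_neg (by push_neg; exact ⟨⟨hr0, hrlt⟩, ⟨hc0, hclt⟩, hnv⟩)]
      have hrlN : row.toNat < g.length := by
        rw [hsh.1]; unfold pvR; omega
      have hclN : col.toNat < (g.getD row.toNat []).length := by
        rw [hsh.2 row.toNat (by unfold pvR; omega)]; unfold pvR; omega
      have hsh1 : pvShape n (pvSetCell g row col ch) := by
        refine ⟨by rw [pvSetCell_length, hsh.1], ?_⟩
        intro i hi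
        rw [pvSetCell_rowlen g col ch hr0 i]; exact hsh.2 i hi
      have hv1 : ∀ t : Int, 0 ≤ t → (row + 1) + t < rb → (col + 1) + t < cb →
          ((row + 1) + t, (col + 1) + t) ∉ PySem.Set.add v (row, col) := by
        intro t ht h1 h2 hmem
        rw [PySem.Set.mem_add] at hmem
        rcases hmem with hmem | hmem
        · have := hv (t + 1) (by omega) (by omega) (by omega)
          rw [show row + (t+1) = row + 1 + t by ring, show col + (t+1) = col + 1 + t by ring] at this
          exact this hmem
        · have h1' := congrArg Prod.fst hmem
          simp at h1'
          omega
      obtain ⟨ihsh, ihmem, ihget⟩ := ih (row + 1) (col + 1) (pvSetCell g row col ch)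
        (PySem.Set.add v (row, col)) (by omega) (by omega) (by omega) hv1 hsh1
      refine ⟨ihsh, ?_, ?_⟩
      · intro p
        rw [ihmem p, PySem.Set.mem_add]
        constructor
        · rintro ((h | h) | h)
          · exact Or.inl h
          · subst h
            refine Or.inr ?_
            rw [pvDiagReg_iff]
            simp
            omega
          · refine Or.inr ?_
            rw [pvDiagReg_iff] at h ⊢
            omega
        · rintro (h | h)
          · exact Or.inl (Or.inl h)
          · by_cases hp : p = (row, col)
            · exact Or.inl (Or.inr hp)
            · refine Or.inr ?_
              rw [pvDiagReg_iff] at h ⊢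
              have hne : ¬ (p.1 = row ∧ p.2 = col) := by
                intro hh
                exact hp (Prod.ext hh.1 hh.2)
              omega
      · intro i j hi hj
        rw [ihget i j hi hj,
          pvGetC_setCell g ch hr0 hrlN hc0 hclN i j]
        by_cases h1 : pvDiagReg rb cb (row+1) (col+1) (i:Int) (j:Int) = true
        · rw [if_pos h1]
          rw [pvDiagReg_iff] at h1
          rw [if_pos (by rw [pvDiagReg_iff]; omega)]
        · rw [if_neg h1]
          rw [pvDiagReg_iff] at h1
          by_cases h2 : i = row.toNat ∧ j = col.toNat
          · rw [if_pos h2, if_pos (by rw [pvDiagReg_iff]; omega)]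
          · rw [if_neg h2, if_neg ?_]
            rw [pvDiagReg_iff]
            intro hR
            have : ¬ (i = row.toNat ∧ j = col.toNat) := h2
            omega


lemma pvDiagA_spec (n rb cb : Int) (ch : Char) (hrb : rb ≤ 2 * n - 1) (hcb : cb ≤ 2 * n - 1) :
    ∀ (m : Nat) (row col : Int) (g : List (List Char)) (v : PySem.Set (Int × Int)),
    (rb - row).toNat ≤ m → 0 ≤ row → 0 ≤ col →
    (∀ t : Int, 0 ≤ t → row + t < rb → col + t < cb → (row + t, col + t) ∉ v) →
    pvShape n g →
    pvShape n (pvDiagA rb cb ch row col (g, v)).1 ∧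
    (∀ p : Int × Int, p ∈ (pvDiagA rb cb ch row col (g, v)).2 ↔
      p ∈ v ∨ pvDiagReg rb cb row col p.1 p.2) ∧
    (∀ i j : Nat, i < pvR n → j < pvR n →
      pvGetC (pvDiagA rb cb ch row col (g, v)).1 i j =
        if pvDiagReg rb cb row col (i : Int) (j : Int) then ch else pvGetC g i j) := by
  intro _ row col g v _ hr hc hv hsh
  unfold pvDiagA
  exact pvDiagAGo_spec n rb cb ch hrb hcb (rb - row).toNat row col g v rfl hr hc hv hsh

lemma pvTopFold (n : Int) (hn : 2 ≤ n) :
    ∀ (m : Nat) (k0 : Int) (g : List (List Char)) (v : PySem.Set (Int × Int)) (prev : Char),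
    (n - k0).toNat ≤ m → 0 ≤ k0 → (prev = 'x' ∨ prev = 'o') → pvShape n g →
    (∀ p : Int × Int, pvTopReg n k0 p.1 p.2 = true → p ∉ v) →
    pvShape n (((PySem.List.pyRange k0 n 2).foldl
        (fun sp temp_row => (pvDiagA n (2*n-1) sp.2 temp_row (n-1) sp.1, pvToggle sp.2))
        ((g, v), prev)).1).1 ∧
    (∀ p : Int × Int, p ∈ (((PySem.List.pyRange k0 n 2).foldl
        (fun sp temp_row => (pvDiagA n (2*n-1) sp.2 temp_row (n-1) sp.1, pvToggle sp.2))
        ((g, v), prev)).1).2 ↔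
      p ∈ v ∨ pvTopReg n k0 p.1 p.2 = true) ∧
    (∀ i j : Nat, i < pvR n → j < pvR n →
      pvGetC (((PySem.List.pyRange k0 n 2).foldl
        (fun sp temp_row => (pvDiagA n (2*n-1) sp.2 temp_row (n-1) sp.1, pvToggle sp.2))
        ((g, v), prev)).1).1 i j =
        if pvTopReg n k0 (i : Int) (j : Int) = true then
          (if (n - 1 + (i : Int) - (j : Int) - k0) % 4 = 0 then prev else pvToggle prev)
        else pvGetC g i j) := by
  intro m
  induction m with
  | zero =>
    intro k0 g v prev hm hk0 hprev hsh hv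
    rw [pvRange_two_nil (by omega)]
    refine ⟨hsh, ?_, ?_⟩
    · intro p
      simp only [List.foldl_nil]
      constructor
      · exact fun h => Or.inl h
      · rintro (h | h)
        · exact h
        · rw [pvTopReg_iff] at h; omega
    · intro i j _ _
      simp only [List.foldl_nil]
      rw [if_neg (by rw [pvTopReg_iff]; omega)]
  | succ m ih =>
    intro k0 g v prev hm hk0 hprev hsh hv
    by_cases hend : n ≤ k0
    · rw [pvRange_two_nil (by omega)]
      refine ⟨hsh, ?_, ?_⟩
      · intro p
        simp only [List.foldl_nil]
        constructor
        · exact fun h => Or.inl h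
        · rintro (h | h)
          · exact h
          · rw [pvTopReg_iff] at h; omega
      · intro i j _ _
        simp only [List.foldl_nil]
        rw [if_neg (by rw [pvTopReg_iff]; omega)]
    · push_neg at hend
      rw [pvRange_two_cons hend, List.foldl_cons]
      -- the step at k0
      have hdv : ∀ t : Int, 0 ≤ t → k0 + t < n → (n-1) + t < 2*n-1 →
          (k0 + t, (n-1) + t) ∉ v := by
        intro t ht h1 h2
        exact hv (k0 + t, (n-1) + t) (by rw [pvTopReg_iff]; simp; omega)
      obtain ⟨s1sh, s1mem, s1get⟩ := pvDiagA_spec n n (2*n-1) prev (by omega) (by omega)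
        (n - k0).toNat k0 (n-1) g v (le_rfl) (by omega) (by omega) hdv hsh
      -- the rest of the fold via IH
      have hv1 : ∀ p : Int × Int, pvTopReg n (k0+2) p.1 p.2 = true →
          p ∉ (pvDiagA n (2*n-1) prev k0 (n-1) (g, v)).2 := by
        intro p hp hmem
        rw [s1mem p] at hmem
        rw [pvTopReg_iff] at hp
        rcases hmem with hmem | hmem
        · exact hv p (by rw [pvTopReg_iff]; omega) hmem
        · rw [pvDiagReg_iff] at hmem; omega
      obtain ⟨rsh, rmem, rget⟩ := ih (k0 + 2)
        (pvDiagA n (2*n-1) prev k0 (n-1) (g, v)).1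
        (pvDiagA n (2*n-1) prev k0 (n-1) (g, v)).2
        (pvToggle prev) (by omega) (by omega) (pvToggle_mem hprev) s1sh hv1
      refine ⟨?_, ?_, ?_⟩
      · simpa using rsh
      · intro p
        have := rmem p
        simp only [Prod.mk.eta] at this ⊢
        rw [this, s1mem p]
        rw [pvTopReg_iff, pvTopReg_iff, pvDiagReg_iff]
        constructor
        · rintro ((h | h) | h)
          · exact Or.inl h
          · exact Or.inr (by omega)
          · exact Or.inr (by omega)
        · rintro (h | h)
          · exact Or.inl (Or.inl h)
          · by_cases hs : pvDiagReg n (2*n-1) k0 (n-1) p.1 p.2 = true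
            · rw [pvDiagReg_iff] at hs
              exact Or.inl (Or.inr hs)
            · rw [pvDiagReg_iff] at hs
              refine Or.inr ?_
              omega
      · intro i j hi hj
        have hr := rget i j hi hj
        simp only [Prod.mk.eta] at hr ⊢
        rw [hr, s1get i j hi hj]
        by_cases h1 : pvTopReg n (k0+2) (i:Int) (j:Int) = true
        · rw [if_pos h1]
          rw [pvTopReg_iff] at h1
          by_cases h4 : (n - 1 + (i:Int) - (j:Int) - k0) % 4 = 0
          · rw [if_neg (show ¬ (n - 1 + (i:Int) - (j:Int) - (k0+2)) % 4 = 0 by omega),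
              if_pos (by rw [pvTopReg_iff]; omega), if_pos h4, pvToggle_toggle hprev]
          · rw [if_pos (show (n - 1 + (i:Int) - (j:Int) - (k0+2)) % 4 = 0 by omega),
              if_pos (by rw [pvTopReg_iff]; omega), if_neg h4]
        · rw [if_neg h1]
          rw [pvTopReg_iff] at h1
          by_cases h2 : pvDiagReg n (2*n-1) k0 (n-1) (i:Int) (j:Int) = true
          · rw [if_pos h2]
            rw [pvDiagReg_iff] at h2
            rw [if_pos (by rw [pvTopReg_iff]; omega), if_pos (by omega)]
          · rw [if_neg h2]
            rw [pvDiagReg_iff] at h2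
            rw [if_neg (by rw [pvTopReg_iff]; omega)]

lemma pvBotFold (n : Int) (hn : 2 ≤ n) :
    ∀ (m : Nat) (c0 : Int) (g : List (List Char)) (v : PySem.Set (Int × Int)) (prev : Char),
    (n - c0).toNat ≤ m → 0 ≤ c0 → (prev = 'x' ∨ prev = 'o') → pvShape n g →
    (∀ p : Int × Int, pvBotReg n c0 p.1 p.2 = true → p ∉ v) →
    ((n - 1 - c0) % 2 = 0 → c0 ≤ n - 1 → ((n - 1 : Int), (n - 1 : Int)) ∈ v) →
    pvShape n (((PySem.List.pyRange c0 n 2).foldl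
        (fun sp temp_col => (pvDiagA (2*n-1) n sp.2 (n-1) temp_col sp.1, pvToggle sp.2))
        ((g, v), prev)).1).1 ∧
    (∀ p : Int × Int, p ∈ (((PySem.List.pyRange c0 n 2).foldl
        (fun sp temp_col => (pvDiagA (2*n-1) n sp.2 (n-1) temp_col sp.1, pvToggle sp.2))
        ((g, v), prev)).1).2 ↔
      p ∈ v ∨ pvBotReg n c0 p.1 p.2 = true) ∧
    (∀ i j : Nat, i < pvR n → j < pvR n →
      pvGetC (((PySem.List.pyRange c0 n 2).foldl
        (fun sp temp_col => (pvDiagA (2*n-1) n sp.2 (n-1) temp_col sp.1, pvToggle sp.2))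
        ((g, v), prev)).1).1 i j =
        if pvBotReg n c0 (i : Int) (j : Int) = true then
          (if ((j : Int) - (i : Int) + n - 1 - c0) % 4 = 0 then prev else pvToggle prev)
        else pvGetC g i j) := by
  intro m
  induction m with
  | zero =>
    intro c0 g v prev hm hc0 hprev hsh hv1 hv2
    rw [pvRange_two_nil (by omega)]
    refine ⟨hsh, ?_, ?_⟩
    · intro p
      simp only [List.foldl_nil]
      constructor
      · exact fun h => Or.inl h
      · rintro (h | h)
        · exact h
        · rw [pvBotReg_iff] at h; omega
    · intro i j _ _
      simp only [List.foldl_nil]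
      rw [if_neg (by rw [pvBotReg_iff]; omega)]
  | succ m ih =>
    intro c0 g v prev hm hc0 hprev hsh hv1 hv2
    by_cases hend : n ≤ c0
    · rw [pvRange_two_nil (by omega)]
      refine ⟨hsh, ?_, ?_⟩
      · intro p
        simp only [List.foldl_nil]
        constructor
        · exact fun h => Or.inl h
        · rintro (h | h)
          · exact h
          · rw [pvBotReg_iff] at h; omega
      · intro i j _ _
        simp only [List.foldl_nil]
        rw [if_neg (by rw [pvBotReg_iff]; omega)]
    · push_neg at hend
      rw [pvRange_two_cons hend, List.foldl_cons]
      by_cases hlast : c0 = n - 1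
      · -- the start cell (n-1, n-1) is already painted by the top fills: nothing happens
        have hvis : ((n - 1 : Int), (n - 1 : Int)) ∈ v := hv2 (by omega) (by omega)
        have hstep : pvDiagA (2*n-1) n prev (n-1) c0 (g, v) = (g, v) := by
          unfold pvDiagA
          cases hf : (2*n-1 - (n-1)).toNat with
          | zero => simp only [pvDiagAGo]
          | succ f =>
            simp only [pvDiagAGo]
            rw [if_pos (Or.inr (Or.inr (by simpa [hlast] using hvis)))]
        rw [hstep]
        have hnil : PySem.List.pyRange (c0 + 2) n 2 = [] := pvRange_two_nil (by omega)
        rw [hnil]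
        refine ⟨hsh, ?_, ?_⟩
        · intro p
          simp only [List.foldl_nil]
          constructor
          · exact fun h => Or.inl h
          · rintro (h | h)
            · exact h
            · rw [pvBotReg_iff] at h; omega
        · intro i j _ _
          simp only [List.foldl_nil]
          rw [if_neg (by rw [pvBotReg_iff]; omega)]
      · -- a genuine bottom diagonal: c0 < n - 1
        have hdv : ∀ t : Int, 0 ≤ t → (n-1) + t < 2*n-1 → c0 + t < n →
            ((n-1) + t, c0 + t) ∉ v := by
          intro t ht h1 h2
          exact hv1 ((n-1) + t, c0 + t) (by rw [pvBotReg_iff]; simp; omega)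
        obtain ⟨s1sh, s1mem, s1get⟩ := pvDiagA_spec n (2*n-1) n prev (by omega) (by omega)
          (2*n-1 - (n-1)).toNat (n-1) c0 g v (le_rfl) (by omega) (by omega) hdv hsh
        have hv1' : ∀ p : Int × Int, pvBotReg n (c0+2) p.1 p.2 = true →
            p ∉ (pvDiagA (2*n-1) n prev (n-1) c0 (g, v)).2 := by
          intro p hp hmem
          rw [s1mem p] at hmem
          rw [pvBotReg_iff] at hp
          rcases hmem with hmem | hmem
          · exact hv1 p (by rw [pvBotReg_iff]; omega) hmem
          · rw [pvDiagReg_iff] at hmem; omega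
        have hv2' : (n - 1 - (c0+2)) % 2 = 0 → c0 + 2 ≤ n - 1 →
            ((n - 1 : Int), (n - 1 : Int)) ∈ (pvDiagA (2*n-1) n prev (n-1) c0 (g, v)).2 := by
          intro hpar hle
          rw [s1mem]
          exact Or.inl (hv2 (by omega) (by omega))
        obtain ⟨rsh, rmem, rget⟩ := ih (c0 + 2)
          (pvDiagA (2*n-1) n prev (n-1) c0 (g, v)).1
          (pvDiagA (2*n-1) n prev (n-1) c0 (g, v)).2
          (pvToggle prev) (by omega) (by omega) (pvToggle_mem hprev) s1sh hv1' hv2'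
        refine ⟨?_, ?_, ?_⟩
        · simpa using rsh
        · intro p
          have hrm := rmem p
          simp only [Prod.mk.eta] at hrm ⊢
          rw [hrm, s1mem p]
          rw [pvBotReg_iff, pvBotReg_iff, pvDiagReg_iff]
          constructor
          · rintro ((h | h) | h)
            · exact Or.inl h
            · exact Or.inr (by omega)
            · exact Or.inr (by omega)
          · rintro (h | h)
            · exact Or.inl (Or.inl h)
            · by_cases hs : pvDiagReg (2*n-1) n (n-1) c0 p.1 p.2 = true
              · rw [pvDiagReg_iff] at hs
                exact Or.inl (Or.inr hs)
              · rw [pvDiagReg_iff] at hs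
                refine Or.inr ?_
                omega
        · intro i j hi hj
          have hr := rget i j hi hj
          simp only [Prod.mk.eta] at hr ⊢
          rw [hr, s1get i j hi hj]
          by_cases h1 : pvBotReg n (c0+2) (i:Int) (j:Int) = true
          · rw [if_pos h1]
            rw [pvBotReg_iff] at h1
            by_cases h4 : ((j:Int) - (i:Int) + n - 1 - c0) % 4 = 0
            · rw [if_neg (show ¬ ((j:Int) - (i:Int) + n - 1 - (c0+2)) % 4 = 0 by omega),
                if_pos (by rw [pvBotReg_iff]; omega), if_pos h4, pvToggle_toggle hprev]
            · rw [if_pos (show ((j:Int) - (i:Int) + n - 1 - (c0+2)) % 4 = 0 by omega),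
                if_pos (by rw [pvBotReg_iff]; omega), if_neg h4]
          · rw [if_neg h1]
            rw [pvBotReg_iff] at h1
            by_cases h2 : pvDiagReg (2*n-1) n (n-1) c0 (i:Int) (j:Int) = true
            · rw [if_pos h2]
              rw [pvDiagReg_iff] at h2
              rw [if_pos (by rw [pvBotReg_iff]; omega),
                if_pos (show ((j:Int) - (i:Int) + n - 1 - c0) % 4 = 0 by omega)]
            · rw [if_neg h2]
              rw [pvDiagReg_iff] at h2
              rw [if_neg (by rw [pvBotReg_iff]; omega)]

lemma pvFoldl_id {α β : Type} (f : α → β → α) (l : List β) (s : α)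
    (h : ∀ x ∈ l, ∀ a, f a x = a) : l.foldl f s = s := by
  induction l generalizing s with
  | nil => rfl
  | cons x t ih =>
    rw [List.foldl_cons, h x (by simp)]
    exact ih s (fun y hy a => h y (by simp [hy]) a)

lemma pvBodyA_id (n rows cols : Int) (s : List (List Char) × PySem.Set (Int × Int))
    (rc : Int × Int) (h1 : ¬(rc.1 = 0 ∧ rc.2 = n - 1)) (h2 : ¬(rc.2 = 0 ∧ rc.1 = n - 1)) :
    pvBodyA n rows cols s rc = s := by
  unfold pvBodyA
  split
  · rfl
  · simp only [if_neg h1, if_neg h2]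

lemma pvBody1 (n : Int) (hn : 2 ≤ n) (s : List (List Char) × PySem.Set (Int × Int))
    (hns : ((0 : Int), n - 1) ∉ s.2) :
    pvBodyA n (2*n-1) (2*n-1) s (0, n - 1) =
      ((PySem.List.pyRange 0 n 2).foldl
        (fun sp temp_row => (pvDiagA n (2*n-1) sp.2 temp_row (n-1) sp.1, pvToggle sp.2))
        (s, 'x')).1 := by
  unfold pvBodyA
  rw [if_neg hns]
  have c1 : (((0 : Int), n - 1).1 = 0 ∧ ((0 : Int), n - 1).2 = n - 1) := ⟨rfl, rfl⟩
  have c2 : ¬(((0 : Int), n - 1).2 = 0 ∧ ((0 : Int), n - 1).1 = n - 1) := by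
    intro h
    have := h.1
    simp at this
    omega
  simp only [if_pos c1, if_neg c2]
  simp

lemma pvBody2 (n : Int) (hn : 2 ≤ n) (s : List (List Char) × PySem.Set (Int × Int))
    (hns : ((n - 1 : Int), (0 : Int)) ∉ s.2) :
    pvBodyA n (2*n-1) (2*n-1) s (n - 1, 0) =
      ((PySem.List.pyRange 0 n 2).foldl
        (fun sp temp_col => (pvDiagA (2*n-1) n sp.2 (n-1) temp_col sp.1, pvToggle sp.2))
        (s, 'x')).1 := by
  unfold pvBodyA
  rw [if_neg hns]
  have c1 : ¬(((n - 1 : Int), (0 : Int)).1 = 0 ∧ ((n - 1 : Int), (0 : Int)).2 = n - 1) := by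
    intro h
    have := h.1
    simp at this
    omega
  have c2 : (((n - 1 : Int), (0 : Int)).2 = 0 ∧ ((n - 1 : Int), (0 : Int)).1 = n - 1) := ⟨rfl, rfl⟩
  simp only [if_neg c1, if_pos c2]
  simp

lemma pvCollapse (n : Int) (hn : 2 ≤ n) (s0 : List (List Char) × PySem.Set (Int × Int)) :
    (PySem.List.pyRange 0 n 1).foldl (fun s row =>
      (PySem.List.pyRange 0 n 1).foldl (fun s col => pvBodyA n (2*n-1) (2*n-1) s (row, col)) s) s0
    = pvBodyA n (2*n-1) (2*n-1) (pvBodyA n (2*n-1) (2*n-1) s0 (0, n - 1)) (n - 1, 0) := by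
  have hsing : PySem.List.pyRange (n-1) n 1 = [n - 1] := by
    rw [PySem.List.pyRange_one_cons (by omega), PySem.List.pyRange_one_eq_nil (by omega)]
  have hsplit : PySem.List.pyRange 0 n 1 = 0 :: (PySem.List.pyRange 1 (n-1) 1 ++ [n - 1]) := by
    rw [PySem.List.pyRange_one_cons (by omega : (0:Int) < n), show (0:Int) + 1 = 1 by norm_num,
      PySem.List.pyRange_one_append 1 (n-1) n (by omega) (by omega), hsing]
  rw [hsplit]
  have hmem1 : ∀ c ∈ PySem.List.pyRange 1 (n-1) 1, 1 ≤ c ∧ c < n - 1 := by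
    intro c hc; rw [PySem.List.mem_pyRange_one] at hc; omega
  have hinner0 : ∀ s, (0 :: (PySem.List.pyRange 1 (n-1) 1 ++ [n - 1])).foldl
      (fun s col => pvBodyA n (2*n-1) (2*n-1) s ((0 : Int), col)) s
      = pvBodyA n (2*n-1) (2*n-1) s (0, n - 1) := by
    intro s
    have hpre : ∀ a, ((0 : Int) :: PySem.List.pyRange 1 (n-1) 1).foldl
        (fun s col => pvBodyA n (2*n-1) (2*n-1) s ((0 : Int), col)) a = a := by
      intro a
      apply pvFoldl_id
      intro c hc b
      rcases List.mem_cons.mp hc with hc | hc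
      · subst hc
        exact pvBodyA_id n _ _ b (0, 0) (by first | (simp; omega) | simp | omega)
          (by first | (simp; omega) | simp | omega)
      · have := hmem1 c hc
        exact pvBodyA_id n _ _ b (0, c) (by first | (simp; omega) | simp | omega)
          (by first | (simp; omega) | simp | omega)
    rw [show (0 : Int) :: (PySem.List.pyRange 1 (n-1) 1 ++ [n - 1])
        = ((0 : Int) :: PySem.List.pyRange 1 (n-1) 1) ++ [n - 1] from rfl,
      List.foldl_append, hpre s, List.foldl_cons, List.foldl_nil]
  have hinnermid : ∀ r ∈ PySem.List.pyRange 1 (n-1) 1, ∀ s,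
      (0 :: (PySem.List.pyRange 1 (n-1) 1 ++ [n - 1])).foldl
      (fun s col => pvBodyA n (2*n-1) (2*n-1) s (r, col)) s = s := by
    intro r hr s
    have hrb := hmem1 r hr
    apply pvFoldl_id
    intro c _ a
    exact pvBodyA_id n _ _ a (r, c) (by first | (simp; omega) | simp | omega)
      (by first | (simp; omega) | simp | omega)
  have hinnerlast : ∀ s, (0 :: (PySem.List.pyRange 1 (n-1) 1 ++ [n - 1])).foldl
      (fun s col => pvBodyA n (2*n-1) (2*n-1) s ((n - 1 : Int), col)) s
      = pvBodyA n (2*n-1) (2*n-1) s (n - 1, 0) := by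
    intro s
    rw [List.foldl_cons]
    apply pvFoldl_id
    intro c hc a
    rcases List.mem_append.mp hc with hc | hc
    · have := hmem1 c hc
      exact pvBodyA_id n _ _ a (n-1, c) (by first | (simp; omega) | simp | omega)
        (by first | (simp; omega) | simp | omega)
    · rw [List.mem_singleton] at hc
      subst hc
      exact pvBodyA_id n _ _ a (n-1, n-1) (by first | (simp; omega) | simp | omega)
        (by first | (simp; omega) | simp | omega)
  have houter_mid : ∀ a, (PySem.List.pyRange 1 (n-1) 1).foldl (fun s row =>
      (0 :: (PySem.List.pyRange 1 (n-1) 1 ++ [n - 1])).foldl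
        (fun s col => pvBodyA n (2*n-1) (2*n-1) s (row, col)) s) a = a := by
    intro a
    apply pvFoldl_id
    intro r hr b
    exact hinnermid r hr b
  rw [List.foldl_cons, hinner0, List.foldl_append, houter_mid, List.foldl_cons, List.foldl_nil,
    hinnerlast]

lemma pvShape0 (n : Int) (hn : 1 ≤ n) :
    pvShape n ((PySem.List.pyRange 0 (2*n-1) 1).map (fun _ => PySem.List.pyRepeat [' '] (2*n-1))) := by
  constructor
  · simp [PySem.List.length_pyRange_one, pvR]
  · intro i hi
    rw [List.getD_eq_getElem _ _ (by simp [PySem.List.length_pyRange_one]; unfold pvR at hi; omega)]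
    simp [PySem.List.pyRepeat_singleton, pvR]

lemma pvGetC0 (n : Int) (i j : Nat) :
    pvGetC ((PySem.List.pyRange 0 (2*n-1) 1).map (fun _ => PySem.List.pyRepeat [' '] (2*n-1))) i j = ' ' := by
  unfold pvGetC
  rcases Nat.lt_or_ge i ((PySem.List.pyRange 0 (2*n-1) 1).map
      (fun _ => PySem.List.pyRepeat [' '] (2*n-1))).length with hi | hi
  · rw [List.getD_eq_getElem _ _ hi]
    simp only [List.getElem_map, PySem.List.pyRepeat_singleton]
    rcases Nat.lt_or_ge j ((List.replicate (2*n-1).toNat ' ').length) with hj | hj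
    · rw [List.getD_eq_getElem _ _ hj, List.getElem_replicate]
    · rw [List.getD_eq_default _ _ hj]
  · rw [List.getD_eq_default _ _ hi]
    simp

lemma pvCellEq (n I J : Int) (hn : 2 ≤ n) (hI0 : 0 ≤ I) (hI1 : I < 2*n-1)
    (hJ0 : 0 ≤ J) (hJ1 : J < 2*n-1) :
    (if pvBotReg n 0 I J = true then
        (if (J - I + n - 1 - 0) % 4 = 0 then 'x' else pvToggle 'x')
      else if pvTopReg n 0 I J = true then
        (if (n - 1 + I - J - 0) % 4 = 0 then 'x' else pvToggle 'x')
      else ' ')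
    = pvCellB n I J := by
  have htog : pvToggle 'x' = 'o' := rfl
  rw [htog]
  simp only [pvCellB]
  by_cases hB : pvBotReg n 0 I J = true
  · rw [if_pos hB]
    have hB' := pvBotReg_iff.mp hB
    have hTneg : ¬(I < n ∧ 0 ≤ n - 1 + I - J ∧ n - 1 + I - J ≤ I ∧ (n - 1 + I - J) % 2 = 0) := by
      omega
    rw [if_neg hTneg, if_pos rfl,
      if_pos (show n - 1 ≤ I ∧ J < n ∧ 0 ≤ J - I + n - 1 ∧ (J - I + n - 1) % 2 = 0 by omega)]
    norm_num
  · rw [if_neg hB]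
    have hB' : ¬(0 ≤ J - I + n - 1 ∧ (J - I + n - 1 - 0) % 2 = 0 ∧ J - I + n - 1 < n - 1 ∧
        n - 1 ≤ I ∧ I < 2 * n - 1 ∧ J < n) := fun h => hB (pvBotReg_iff.mpr (by omega))
    by_cases hT : pvTopReg n 0 I J = true
    · rw [if_pos hT]
      have hT' := pvTopReg_iff.mp hT
      rw [if_pos (show I < n ∧ 0 ≤ n - 1 + I - J ∧ n - 1 + I - J ≤ I ∧ (n - 1 + I - J) % 2 = 0 by
        omega)]
      rw [if_neg (show ¬(if (n - 1 + I - J) % 4 = 0 then 'x' else 'o') = ' ' by split <;> decide)]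
      norm_num
    · rw [if_neg hT]
      have hT' : ¬(0 ≤ n - 1 + I - J ∧ (n - 1 + I - J - 0) % 2 = 0 ∧ n - 1 + I - J ≤ I ∧ I < n) :=
        fun h => hT (pvTopReg_iff.mpr (by omega))
      rw [if_neg (show ¬(I < n ∧ 0 ≤ n - 1 + I - J ∧ n - 1 + I - J ≤ I ∧ (n - 1 + I - J) % 2 = 0) by
        omega), if_pos rfl]
      rw [if_neg ?hbot]
      case hbot =>
        intro hc
        by_cases hCeq : J - I + n - 1 = n - 1
        · exact hT' (by omega)
        · exact hB' (by omega)

lemma pvMain_le_zero {n : Int} (h : n ≤ 0) : easyPattern n = easyPattern_alt n := by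
  simp only [easyPattern, easyPattern_alt]
  rw [show n * 2 - 1 = 2 * n - 1 by ring]
  rw [PySem.List.pyRange_one_eq_nil (by omega : (2 * n - 1 : Int) ≤ 0),
    PySem.List.pyRange_one_eq_nil (by omega : n ≤ (0 : Int))]
  simp

lemma pvMain_one : easyPattern 1 = easyPattern_alt 1 := by
  decide

lemma pvMain_two {n : Int} (hn : 2 ≤ n) : easyPattern n = easyPattern_alt n := by
  simp only [easyPattern, easyPattern_alt]
  rw [show n * 2 - 1 = 2 * n - 1 by ring]
  rw [pvCollapse n hn]
  rw [pvBody1 n hn ((PySem.List.pyRange 0 (2*n-1) 1).map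
      (fun _ => PySem.List.pyRepeat [' '] (2*n-1)), PySem.Set.empty)
    (by simp [PySem.Set.empty])]
  obtain ⟨sh1, mem1, get1⟩ := pvTopFold n hn n.toNat 0
    ((PySem.List.pyRange 0 (2*n-1) 1).map (fun _ => PySem.List.pyRepeat [' '] (2*n-1)))
    PySem.Set.empty 'x' (by omega) le_rfl (Or.inl rfl) (pvShape0 n (by omega))
    (by intro p _; simp [PySem.Set.empty])
  have hnv2 : ((n - 1 : Int), (0 : Int)) ∉ (((PySem.List.pyRange 0 n 2).foldl
      (fun sp temp_row => (pvDiagA n (2*n-1) sp.2 temp_row (n-1) sp.1, pvToggle sp.2))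
      ((((PySem.List.pyRange 0 (2*n-1) 1).map (fun _ => PySem.List.pyRepeat [' '] (2*n-1)),
        PySem.Set.empty)), 'x')).1).2 := by
    intro h
    rcases (mem1 _).1 h with h | h
    · simp [PySem.Set.empty] at h
    · rw [pvTopReg_iff] at h
      simp at h
      omega
  rw [pvBody2 n hn _ hnv2]
  obtain ⟨sh2, mem2, get2⟩ := pvBotFold n hn n.toNat 0
    ((((PySem.List.pyRange 0 n 2).foldl
      (fun sp temp_row => (pvDiagA n (2*n-1) sp.2 temp_row (n-1) sp.1, pvToggle sp.2))
      ((((PySem.List.pyRange 0 (2*n-1) 1).map (fun _ => PySem.List.pyRepeat [' '] (2*n-1)),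
        PySem.Set.empty)), 'x')).1).1)
    ((((PySem.List.pyRange 0 n 2).foldl
      (fun sp temp_row => (pvDiagA n (2*n-1) sp.2 temp_row (n-1) sp.1, pvToggle sp.2))
      ((((PySem.List.pyRange 0 (2*n-1) 1).map (fun _ => PySem.List.pyRepeat [' '] (2*n-1)),
        PySem.Set.empty)), 'x')).1).2)
    'x' (by omega) le_rfl (Or.inl rfl) sh1
    (by
      intro p hp hmem
      rcases (mem1 p).1 hmem with h | h
      · simp [PySem.Set.empty] at h
      · rw [pvBotReg_iff] at hp
        rw [pvTopReg_iff] at h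
        omega)
    (by
      intro hpar _
      exact (mem1 _).2 (Or.inr (by rw [pvTopReg_iff]; simp; omega)))
  simp only [Prod.mk.eta] at sh2 mem2 get2
  have hcell : ∀ (i j : Nat), i < pvR n → j < pvR n →
      pvGetC ((((PySem.List.pyRange 0 n 2).foldl
        (fun sp temp_col => (pvDiagA (2*n-1) n sp.2 (n-1) temp_col sp.1, pvToggle sp.2))
        (((PySem.List.pyRange 0 n 2).foldl
          (fun sp temp_row => (pvDiagA n (2*n-1) sp.2 temp_row (n-1) sp.1, pvToggle sp.2))
          ((((PySem.List.pyRange 0 (2*n-1) 1).map (fun _ => PySem.List.pyRepeat [' '] (2*n-1)),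
            PySem.Set.empty)), 'x')).1, 'x')).1).1) i j = pvCellB n i j := by
    intro i j hi hj
    rw [get2 i j hi hj, get1 i j hi hj, pvGetC0]
    have hiI : (0 : Int) ≤ (i : Int) := by omega
    have hjI : (0 : Int) ≤ (j : Int) := by omega
    have hiI2 : (i : Int) < 2 * n - 1 := by unfold pvR at hi; omega
    have hjI2 : (j : Int) < 2 * n - 1 := by unfold pvR at hj; omega
    exact pvCellEq n i j hn hiI hiI2 hjI hjI2
  congr 1
  congr 1
  apply List.map_congr_left
  intro i hi
  rw [PySem.List.mem_pyRange_one] at hi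
  rw [PySem.List.pyGetD_of_nonneg _ _ hi.1]
  have hiN : i.toNat < pvR n := by unfold pvR; omega
  apply List.ext_getElem
  · rw [sh2.2 i.toNat hiN]
    simp [PySem.List.length_pyRange_one, pvR]
  · intro k hk1 hk2
    have hkR : k < pvR n := by
      rw [sh2.2 i.toNat hiN] at hk1
      exact hk1
    rw [List.getElem_map, PySem.List.getElem_pyRange_one]
    have hc := hcell i.toNat k hiN hkR
    unfold pvGetC at hc
    rw [List.getD_eq_getElem _ _ hk1] at hc
    rw [hc, Int.toNat_of_nonneg hi.1]
    norm_num

-- ===== VERDICT (by name: the statement is the Claim_ definition above) =====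
theorem easyPattern_spec : Claim_equal_easyPattern := by
  intro n _
  unfold Spec_easyPattern
  rcases (by omega : n ≤ 0 ∨ n = 1 ∨ 2 ≤ n) with h | h | h
  · exact pvMain_le_zero h
  · subst h; exact pvMain_one
  · exact pvMain_two h
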